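-- pv_equiv track=rewrite | github.com/Edwin-Tu/2026-python | weeks/week-08/solutions/1114405014/question_10193/solution_practise.py | find_min_b_plus_c
-- ===== SOURCE A (Python) =====
-- def find_min_b_plus_c(a):
--     best = float('inf')
--     a_sq = a * a
--
--     for k in range(1, a + 1):
--         if a_sq % k != 0:
--             continue
--         c = a + a_sq // k
--         b = a + k
--         best = min(best, b + c)
--
--     return int(best)
-- ===== SOURCE B (Python) =====
-- def find_min_b_plus_c(a):
--     # b+c = 2a + k + a*a//k over divisors k of a*a with 1 <= k <= a;
--     # by AM-GM k + a*a//k >= 2a with equality at the divisor k = a, so the minimum is 4a.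
--     return 4 * a
-- ===== Notes on version B (the rewrite author's own statement) =====
-- stated objective: faster
-- what changed: Replaced the O(a) divisor scan minimizing 2a+k+a*a//k by the closed form 4*a, justified by AM-GM (k + a^2/k >= 2a, equality at the divisor k = a).
-- outside the precondition, e.g. on find_min_b_plus_c(0): A raises OverflowError, B returns 0
import Mathlib
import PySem

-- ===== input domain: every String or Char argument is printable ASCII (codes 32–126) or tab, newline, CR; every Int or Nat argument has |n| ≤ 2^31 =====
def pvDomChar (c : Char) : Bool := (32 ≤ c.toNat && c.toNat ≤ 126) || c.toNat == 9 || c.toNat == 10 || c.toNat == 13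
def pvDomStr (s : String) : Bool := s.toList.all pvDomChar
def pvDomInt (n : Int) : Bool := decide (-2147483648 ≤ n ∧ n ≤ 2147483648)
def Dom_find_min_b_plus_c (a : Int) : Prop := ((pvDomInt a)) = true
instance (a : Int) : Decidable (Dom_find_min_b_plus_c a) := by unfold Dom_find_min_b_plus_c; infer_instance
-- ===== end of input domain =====

-- B replaces A's O(a) divisor scan by the closed form 4*a (AM-GM: k + a²/k ≥ 2a, equality at k = a).

-- ===== PORT A =====
-- loop body of A: best is Option Int, none = float('inf')
def pvStepA (a : Int) (best : Option Int) (k : Int) : Option Int :=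
  if PySem.Int.mod (a * a) k ≠ 0 then best
  else
    let c := a + PySem.Int.floordiv (a * a) k
    let b := a + k
    match best with
    | none => some (b + c)
    | some v => some (min v (b + c))

def find_min_b_plus_c (a : Int) : Int :=
  -- int(best) with best = inf raises OverflowError (a ≤ 0); those inputs are outside Pre_
  ((PySem.List.pyRange 1 (a + 1) 1).foldl (pvStepA a) none).getD 0

-- ===== PORT B =====
def find_min_b_plus_c_alt (a : Int) : Int := 4 * a

-- ===== PRECONDITION & SPEC =====
-- Pre_ excludes a ≤ 0, where the loop never runs and A raises OverflowError on int(float('inf')).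
def Pre_find_min_b_plus_c (a : Int) : Prop := 1 ≤ a
instance (a : Int) : Decidable (Pre_find_min_b_plus_c a) := by unfold Pre_find_min_b_plus_c; infer_instance
def pvWitness_find_min_b_plus_c : Int := 6

def Spec_find_min_b_plus_c (a : Int) (out : Int) : Prop := out = find_min_b_plus_c_alt a
instance (a : Int) (out : Int) : Decidable (Spec_find_min_b_plus_c a out) := by unfold Spec_find_min_b_plus_c; infer_instance

-- ===== CLAIM (what is proved, stated in full; the proofs are below) =====
def Claim_equal_find_min_b_plus_c : Prop := ∀ (a : Int), Dom_find_min_b_plus_c a → Pre_find_min_b_plus_c a → Spec_find_min_b_plus_c a (find_min_b_plus_c a)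

-- ===== LEMMAS AND PROOFS =====

-- AM-GM for divisors: any accepted k contributes a value ≥ 4a
lemma pv_value_ge (a k : Int) (hk : 1 ≤ k) (hdvd : PySem.Int.mod (a * a) k = 0) :
    4 * a ≤ (a + k) + (a + PySem.Int.floordiv (a * a) k) := by
  have hkpos : (0:Int) < k := hk
  have hd : k ∣ a * a := (PySem.Int.mod_eq_zero_iff_dvd _ _).1 hdvd
  obtain ⟨q, hq⟩ := hd
  have hfd : PySem.Int.floordiv (a * a) k = q := by
    rw [PySem.Int.floordiv_eq_ediv_of_pos hkpos, hq, Int.mul_ediv_cancel_left _ (by omega)]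
  rw [hfd]
  nlinarith [sq_nonneg (k - a)]

-- lower bound invariant of A's fold
lemma pv_fold_lb (a : Int) : ∀ (L : List Int) (acc : Option Int),
    (∀ k ∈ L, 1 ≤ k) → (∀ v, acc = some v → 4 * a ≤ v) →
    ∀ v, L.foldl (pvStepA a) acc = some v → 4 * a ≤ v := by
  intro L
  induction L with
  | nil => intro acc _ hacc v hv; exact hacc v hv
  | cons k rest ih =>
    intro acc hL hacc v hv
    refine ih (pvStepA a acc k) (fun x hx => hL x (List.mem_cons_of_mem _ hx)) ?_ v hv
    intro w hw
    have hk1 : 1 ≤ k := hL k (List.mem_cons_self)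
    unfold pvStepA at hw
    split at hw
    · exact hacc w hw
    · rename_i hmod
      have hmod0 : PySem.Int.mod (a * a) k = 0 := by
        by_contra h; exact hmod h
      have hge := pv_value_ge a k hk1 hmod0
      cases hacc' : acc with
      | none => simp [hacc'] at hw; omega
      | some u =>
        simp [hacc'] at hw
        have hu := hacc u hacc'
        have : min u ((a + k) + (a + PySem.Int.floordiv (a * a) k)) = w := by
          simpa [add_comm, add_left_comm, add_assoc] using hw
        rcases min_choice u ((a + k) + (a + PySem.Int.floordiv (a * a) k)) with h | h <;> omega

-- upper bound / definedness: once a itself is processed (or acc already ≤ 4a), the result is some v ≤ 4a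
lemma pv_fold_ub (a : Int) (ha : 1 ≤ a) : ∀ (L : List Int) (acc : Option Int),
    (a ∈ L ∨ ∃ v, acc = some v ∧ v ≤ 4 * a) →
    ∃ v, L.foldl (pvStepA a) acc = some v ∧ v ≤ 4 * a := by
  intro L
  induction L with
  | nil =>
    intro acc h
    rcases h with h | ⟨v, hv, hle⟩
    · simp at h
    · exact ⟨v, by simpa using hv, hle⟩
  | cons k rest ih =>
    intro acc h
    simp only [List.foldl_cons]
    rcases h with hmem | ⟨v, hv, hle⟩
    · rcases List.mem_cons.1 hmem with rfl | hrest
      · -- processing k = a: mod (a*a) a = 0, value = 4a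
        have hmod0 : PySem.Int.mod (a * a) a = 0 := by
          rw [PySem.Int.mod_eq_zero_iff_dvd _ _]
          exact ⟨a, rfl⟩
        have hfd : PySem.Int.floordiv (a * a) a = a := by
          rw [PySem.Int.floordiv_eq_ediv_of_pos (by omega), Int.mul_ediv_cancel_left _ (by omega)]
        refine ih (pvStepA a acc a) (Or.inr ?_)
        unfold pvStepA
        rw [if_neg (by simp [hmod0])]
        cases acc with
        | none => exact ⟨_, rfl, by simp [hfd]; ring_nf; omega⟩
        | some u =>
          refine ⟨_, rfl, ?_⟩
          have : (a + a) + (a + PySem.Int.floordiv (a * a) a) = 4 * a := by rw [hfd]; ring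
          rw [this]
          exact min_le_right _ _
      · exact ih (pvStepA a acc k) (Or.inl hrest)
    · -- acc already some v ≤ 4a; a step preserves that
      subst hv
      refine ih _ (Or.inr ?_)
      unfold pvStepA
      split
      · exact ⟨v, rfl, hle⟩
      · exact ⟨_, rfl, le_trans (min_le_left _ _) hle⟩

-- ===== VERDICT (by name: the statement is the Claim_ definition above) =====
theorem find_min_b_plus_c_spec : Claim_equal_find_min_b_plus_c := by
  intro a _ hpre
  unfold Spec_find_min_b_plus_c find_min_b_plus_c find_min_b_plus_c_alt
  have ha : 1 ≤ a := hpre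
  have hmem : a ∈ PySem.List.pyRange 1 (a + 1) 1 := by
    rw [PySem.List.mem_pyRange_one]; omega
  obtain ⟨v, hv, hle⟩ := pv_fold_ub a ha (PySem.List.pyRange 1 (a + 1) 1) none (Or.inl hmem)
  have hge := pv_fold_lb a (PySem.List.pyRange 1 (a + 1) 1) none
    (fun k hk => ((PySem.List.mem_pyRange_one).1 hk).1)
    (by intro v h; simp at h) v hv
  rw [hv]
  simp only [Option.getD_some]
  omega
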